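-- pv_equiv track=rewrite | github.com/Haanyaj/NLP | assignement2/prog.py | relevant
-- ===== SOURCE A (Python) =====
-- def relevant(tab, newquery):
--     re = 0
--     for (i,j) in tab:
--         for a in range(0, len(j) - 1):
--             is_relevant = 0
--             for b in j[1]:
--                 for c in range(0, len(b) - 1):
--                     if (b[c] in newquery):
--                         is_relevant += 1
--                         if (is_relevant == len(newquery)):
--                             re += 1
--
--     return (re)
-- ===== SOURCE B (Python) =====
-- def relevant(tab, newquery):
--     L = len(newquery)
--     total = 0
--     for (i, j) in tab:
--         if len(j) >= 2 and L >= 1: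
--             m = sum(sum(1 for c in range(len(b) - 1) if b[c] in newquery) for b in j[1])
--             if m >= L:
--                 total += len(j) - 1
--     return total
-- ===== Notes on version B (the rewrite author's own statement) =====
-- stated objective: faster
-- what changed: A reruns the full match-counting scan over j[1] once per a in range(len(j)-1); B computes the a-independent match count once per table entry and adds len(j)-1 when it reaches len(newquery).
import Mathlib
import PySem

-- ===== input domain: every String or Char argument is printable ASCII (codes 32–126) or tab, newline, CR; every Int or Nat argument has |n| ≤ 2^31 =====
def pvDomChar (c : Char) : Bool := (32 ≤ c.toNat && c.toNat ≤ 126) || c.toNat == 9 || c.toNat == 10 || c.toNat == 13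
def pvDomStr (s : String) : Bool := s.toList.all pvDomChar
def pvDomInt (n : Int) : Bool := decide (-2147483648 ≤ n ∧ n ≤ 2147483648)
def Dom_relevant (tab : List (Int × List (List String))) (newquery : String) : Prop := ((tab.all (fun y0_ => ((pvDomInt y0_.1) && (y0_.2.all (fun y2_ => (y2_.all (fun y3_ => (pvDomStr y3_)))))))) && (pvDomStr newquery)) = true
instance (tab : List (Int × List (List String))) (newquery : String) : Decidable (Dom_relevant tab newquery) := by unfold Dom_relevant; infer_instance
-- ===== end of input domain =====

-- B computes the a-independent inner match count once per table entry and adds len(j)-1 at most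
-- once per entry, instead of rerunning the inner scan for every a (objective: faster).

-- ===== PORT A =====
-- A's inner (b,c) double loop over the state (is_relevant, re); b[c] is a single character,
-- so 'b[c] in newquery' is the 1-char-substring test, ported exactly as PySem.Chars.isIn
def relevantInner (newquery : String) (j1 : List String) (st : Int × Int) : Int × Int :=
  j1.foldl (fun st b =>
    (PySem.List.pyRange 0 ((PySem.Str.len b : Int) - 1) 1).foldl (fun st c =>
      if PySem.Chars.isIn [PySem.List.pyGetD b.toList c ' '] newquery.toList then
        let ir := st.1 + 1
        (ir, if ir = (PySem.Str.len newquery : Int) then st.2 + 1 else st.2)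
      else st) st) st

def relevant (tab : List (Int × List (List String))) (newquery : String) : Int :=
  tab.foldl (fun re p =>
    (PySem.List.pyRange 0 ((p.2.length : Int) - 1) 1).foldl (fun re _a =>
      (relevantInner newquery (PySem.List.pyGetD p.2 1 []) (0, re)).2) re) 0

-- ===== PORT B =====
def relevant_alt (tab : List (Int × List (List String))) (newquery : String) : Int :=
  let L := PySem.Str.len newquery
  tab.foldl (fun total p =>
    if 2 ≤ p.2.length ∧ 1 ≤ L then
      let m := ((PySem.List.pyGetD p.2 1 []).map (fun b =>
        (PySem.List.pyRange 0 ((PySem.Str.len b : Int) - 1) 1).countP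
          (fun c => PySem.Chars.isIn [PySem.List.pyGetD b.toList c ' '] newquery.toList))).sum
      if L ≤ m then total + ((p.2.length : Int) - 1) else total
    else total) 0

-- ===== PRECONDITION & SPEC =====
def Spec_relevant (tab : List (Int × List (List String))) (newquery : String) (out : Int) : Prop := out = relevant_alt tab newquery
instance (tab : List (Int × List (List String))) (newquery : String) (out : Int) : Decidable (Spec_relevant tab newquery out) := by unfold Spec_relevant; infer_instance

-- ===== CLAIM (what is proved, stated in full; the proofs are below) =====
def Claim_equal_relevant : Prop := ∀ (tab : List (Int × List (List String))) (newquery : String), Dom_relevant tab newquery → Spec_relevant tab newquery (relevant tab newquery)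

-- ===== LEMMAS AND PROOFS =====

-- the step function of A's inner loop, abstracted over the match booleans
def relStep (L : Int) (st : Int × Int) (x : Bool) : Int × Int :=
  if x then (st.1 + 1, if st.1 + 1 = L then st.2 + 1 else st.2) else st

theorem relStep_fold (L : Int) (xs : List Bool) (ir re : Int) :
    xs.foldl (relStep L) (ir, re) =
      (ir + xs.count true,
       re + if ir < L ∧ L ≤ ir + xs.count true then 1 else 0) := by
  induction xs generalizing ir re with
  | nil => simp
  | cons x rest ih =>
    cases x with
    | false =>
      have hstep : relStep L (ir, re) false = (ir, re) := by simp [relStep]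
      rw [List.foldl_cons, hstep, ih]
      simp
    | true =>
      have hstep : relStep L (ir, re) true = (ir + 1, if ir + 1 = L then re + 1 else re) := by
        simp [relStep]
      rw [List.foldl_cons, hstep, ih]
      have hc : (List.count true (true :: rest) : Int) = (List.count true rest : Int) + 1 := by
        simp
      rw [Prod.mk.injEq]
      constructor
      · omega
      · split_ifs <;> omega

-- a foldl whose body only inspects the element pointwise equals the relStep foldl on the bools
theorem fold_body_congr (L : Int) (f : Int → Bool) (l : List Int) (st : Int × Int) :
    l.foldl (fun st c =>
      if f c then (st.1 + 1, if st.1 + 1 = L then st.2 + 1 else st.2) else st) st =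
    (l.map f).foldl (relStep L) st := by
  rw [List.foldl_map]
  rfl

theorem relevantInner_eq (newquery : String) (j1 : List String) (ir re : Int) :
    relevantInner newquery j1 (ir, re) =
      (j1.flatMap (fun b =>
        (PySem.List.pyRange 0 ((PySem.Str.len b : Int) - 1) 1).map
          (fun c => PySem.Chars.isIn [PySem.List.pyGetD b.toList c ' '] newquery.toList))).foldl
        (relStep (PySem.Str.len newquery : Int)) (ir, re) := by
  unfold relevantInner
  induction j1 generalizing ir re with
  | nil => simp
  | cons b rest ih =>
    rw [List.flatMap_cons, List.foldl_append, List.foldl_cons,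
      fold_body_congr (PySem.Str.len newquery : Int)
        (fun c => PySem.Chars.isIn [PySem.List.pyGetD b.toList c ' '] newquery.toList)]
    obtain ⟨ir', re'⟩ := ((PySem.List.pyRange 0 ((PySem.Str.len b : Int) - 1) 1).map
        (fun c => PySem.Chars.isIn [PySem.List.pyGetD b.toList c ' '] newquery.toList)).foldl
        (relStep (PySem.Str.len newquery : Int)) (ir, re)
    exact ih ir' re'

-- count of trues in the flattened boolean list = B's per-entry match count
theorem count_flat (newquery : String) (j1 : List String) :
    (j1.flatMap (fun b =>
        (PySem.List.pyRange 0 ((PySem.Str.len b : Int) - 1) 1).map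
          (fun c => PySem.Chars.isIn [PySem.List.pyGetD b.toList c ' '] newquery.toList))).count true =
      (j1.map (fun b =>
        (PySem.List.pyRange 0 ((PySem.Str.len b : Int) - 1) 1).countP
          (fun c => PySem.Chars.isIn [PySem.List.pyGetD b.toList c ' '] newquery.toList))).sum := by
  induction j1 with
  | nil => simp
  | cons b rest ih =>
    rw [List.flatMap_cons, List.map_cons, List.sum_cons, List.count_append, ih]
    congr 1
    rw [List.count_eq_countP, List.countP_map]
    apply List.countP_congr
    intro c _
    simp

-- per-entry agreement: A's a-loop over one table entry equals B's per-entry update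
theorem entry_eq (newquery : String) (j : List (List String)) (re : Int) :
    (PySem.List.pyRange 0 ((j.length : Int) - 1) 1).foldl (fun re _a =>
      (relevantInner newquery (PySem.List.pyGetD j 1 []) (0, re)).2) re =
    (if 2 ≤ j.length ∧ 1 ≤ PySem.Str.len newquery then
      if PySem.Str.len newquery ≤ ((PySem.List.pyGetD j 1 []).map (fun b =>
        (PySem.List.pyRange 0 ((PySem.Str.len b : Int) - 1) 1).countP
          (fun c => PySem.Chars.isIn [PySem.List.pyGetD b.toList c ' '] newquery.toList))).sum
      then re + ((j.length : Int) - 1) else re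
    else re) := by
  set L : Int := PySem.Str.len newquery with hL
  set m : Nat := ((PySem.List.pyGetD j 1 []).map (fun b =>
        (PySem.List.pyRange 0 ((PySem.Str.len b : Int) - 1) 1).countP
          (fun c => PySem.Chars.isIn [PySem.List.pyGetD b.toList c ' '] newquery.toList))).sum with hm
  have hbody : ∀ r : Int, (relevantInner newquery (PySem.List.pyGetD j 1 []) (0, r)).2 =
      r + if 0 < L ∧ L ≤ (m : Int) then 1 else 0 := by
    intro r
    rw [relevantInner_eq, relStep_fold]
    rw [count_flat, ← hm, ← hL]
    norm_num
  have hfold : ∀ (l : List Int) (r : Int),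
      l.foldl (fun re _a => (relevantInner newquery (PySem.List.pyGetD j 1 []) (0, re)).2) r =
        r + l.length * (if 0 < L ∧ L ≤ (m : Int) then 1 else 0) := by
    intro l
    induction l with
    | nil => intro r; simp
    | cons x rest ih =>
      intro r
      rw [List.foldl_cons, hbody, ih, List.length_cons]
      push_cast; ring
  rw [hfold, PySem.List.length_pyRange_one]
  by_cases hj : j.length ≤ 1
  · have h0 : (((j.length : Int) - 1 - 0).toNat) = 0 := by omega
    have hc : ¬(2 ≤ j.length ∧ 1 ≤ L) := by omega
    rw [h0, if_neg hc]
    simp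
  · have h1 : ((((j.length : Int) - 1 - 0).toNat : Int)) = (j.length : Int) - 1 := by omega
    rw [h1]
    by_cases hLpos : 1 ≤ L
    · have hc : 2 ≤ j.length ∧ 1 ≤ L := ⟨by omega, hLpos⟩
      rw [if_pos hc]
      by_cases hLe : L ≤ (m : Int)
      · have hd : 0 < L ∧ L ≤ (m : Int) := ⟨by omega, hLe⟩
        rw [if_pos hLe, if_pos hd]; ring
      · have hd : ¬(0 < L ∧ L ≤ (m : Int)) := fun h => hLe h.2
        rw [if_neg hLe, if_neg hd]; ring
    · have hc : ¬(2 ≤ j.length ∧ 1 ≤ L) := fun h => hLpos h.2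
      have hd : ¬(0 < L ∧ L ≤ (m : Int)) := fun h => hLpos (by omega)
      rw [if_neg hc, if_neg hd]
      ring

-- ===== VERDICT (by name: the statement is the Claim_ definition above) =====
theorem relevant_spec : Claim_equal_relevant := by
  intro tab newquery _
  unfold Spec_relevant relevant relevant_alt
  induction tab using List.reverseRecOn with
  | nil => rfl
  | append_singleton rest p ih =>
    simp only [List.foldl_append, List.foldl_cons, List.foldl_nil, entry_eq]
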